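-- pv_equiv track=rewrite | github.com/Neihtq/advent_of_code24 | day9.py | get_heaps
-- ===== SOURCE A (Python) =====
-- from collections import defaultdict
--
-- EMPTY_FIELD = '.'
--
-- def get_heaps(file_system):
--     min_heaps = defaultdict(list)
--     left, right = 0, 0
--     left = 0
--     while left < len(file_system):
--         if file_system[left] == EMPTY_FIELD:
--             right = left + 1
--             while right < len(file_system) and file_system[right] == EMPTY_FIELD:
--                 right += 1
--             length = right - left
--             min_heaps[length].append((left, right))
--             left = right
--         else:
--             left += 1
--
--     return min_heaps
-- ===== SOURCE B (Python) =====
-- from collections import defaultdict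
-- from itertools import groupby
--
-- EMPTY_FIELD = '.'
--
-- def get_heaps(file_system):
--     # Stage 1: extract the indices of all empty fields.
--     dots = [i for i, c in enumerate(file_system) if c == EMPTY_FIELD]
--     # Stage 2: split the index list into maximal consecutive runs using the
--     # classic "value minus rank is constant on a consecutive run" key.
--     min_heaps = defaultdict(list)
--     for _, grp in groupby(enumerate(dots), key=lambda t: t[1] - t[0]):
--         run = [p for _, p in grp]
--         min_heaps[len(run)].append((run[0], run[0] + len(run)))
--     return min_heaps
-- ===== Notes on version B (the rewrite author's own statement) =====
-- stated objective: alternative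
-- what changed: Instead of A's two-pointer while-loop scan over characters, B first extracts the list of dot indices with a comprehension and then splits that index list into maximal consecutive runs via itertools.groupby keyed on position-minus-rank.
import Mathlib
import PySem

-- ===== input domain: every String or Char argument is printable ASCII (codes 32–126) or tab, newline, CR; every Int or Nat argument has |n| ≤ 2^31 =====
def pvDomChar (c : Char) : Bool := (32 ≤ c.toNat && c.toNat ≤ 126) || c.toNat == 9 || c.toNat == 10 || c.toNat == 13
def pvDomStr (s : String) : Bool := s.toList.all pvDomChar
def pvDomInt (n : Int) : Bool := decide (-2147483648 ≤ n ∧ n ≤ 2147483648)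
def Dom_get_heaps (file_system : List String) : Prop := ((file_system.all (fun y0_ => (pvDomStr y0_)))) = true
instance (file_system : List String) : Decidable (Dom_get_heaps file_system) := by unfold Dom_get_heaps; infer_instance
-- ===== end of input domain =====

-- B replaces A's two-pointer scan by two stages: extract the list of dot indices, then
-- group it into maximal consecutive runs via the "position minus rank" groupby key (alternative, same cost).

-- shared dict primitive: `defaultdict(list)[k].append(v)` on an insertion-ordered assoc list
def dictPush (d : List (Int × List (Int × Int))) (k : Int) (v : Int × Int) : List (Int × List (Int × Int)) :=
  match d with
  | [] => [(k, [v])]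
  | (k', vs) :: rest => if k' = k then (k', vs ++ [v]) :: rest else (k', vs) :: dictPush rest k v

-- ===== PORT A =====
-- inner `while right < len and fs[right] == '.'` loop
def aInner (fs : List String) (r : Nat) : Nat :=
  if h : r < fs.length then
    if fs[r] == "." then aInner fs (r + 1) else r
  else r
termination_by fs.length - r

-- needed by aOuter's termination proof: the inner loop never moves `right` backwards
theorem aInner_ge (fs : List String) (r : Nat) : r ≤ aInner fs r := by
  induction r using aInner.induct fs with
  | case1 r h hd ih => rw [aInner]; simp [h, hd]; omega
  | case2 r h hd => rw [aInner]; simp [h, hd]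
  | case3 r h => rw [aInner]; simp [h]

-- outer `while left < len` loop
def aOuter (fs : List String) (left : Nat) (d : List (Int × List (Int × Int))) :
    List (Int × List (Int × Int)) :=
  if h : left < fs.length then
    if fs[left] == "." then
      let right := aInner fs (left + 1)
      aOuter fs right (dictPush d ((right : Int) - (left : Int)) ((left : Int), (right : Int)))
    else aOuter fs (left + 1) d
  else d
termination_by fs.length - left
decreasing_by
  · have := aInner_ge fs (left + 1); omega
  · omega

def get_heaps (file_system : List String) : List (Int × List (Int × Int)) :=
  aOuter file_system 0 []

-- ===== PORT B =====
-- `dots = [i for i, c in enumerate(file_system) if c == '.']`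
def bDots (fs : List String) : List Int :=
  (PySem.List.enumerate fs).filterMap (fun t => if t.2 == "." then some t.1 else none)

-- `for _, grp in groupby(enumerate(dots), key=lambda t: t[1] - t[0]): run = [...]; push`
-- (groupby is lazy; each group is the maximal prefix with the same key, consumed in the loop body)
def bLoop (l : List (Int × Int)) (d : List (Int × List (Int × Int))) :
    List (Int × List (Int × Int)) :=
  match l with
  | [] => d
  | (j, p) :: rest =>
    let run := rest.takeWhile (fun t => t.2 - t.1 == p - j)
    bLoop (rest.drop run.length)
      (dictPush d ((run.length + 1 : Nat) : Int) (p, p + ((run.length + 1 : Nat) : Int)))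
termination_by l.length
decreasing_by
  simp only [List.length_drop, List.length_cons]
  omega

def get_heaps_alt (file_system : List String) : List (Int × List (Int × Int)) :=
  bLoop (PySem.List.enumerate (bDots file_system)) []

-- ===== PRECONDITION & SPEC =====
def Spec_get_heaps (file_system : List String) (out : List (Int × List (Int × Int))) : Prop := out = get_heaps_alt file_system
instance (file_system : List String) (out : List (Int × List (Int × Int))) : Decidable (Spec_get_heaps file_system out) := by unfold Spec_get_heaps; infer_instance

-- ===== CLAIM (what is proved, stated in full; the proofs are below) =====
def Claim_equal_get_heaps : Prop := ∀ (file_system : List String), Dom_get_heaps file_system → Spec_get_heaps file_system (get_heaps file_system)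

-- ===== LEMMAS AND PROOFS =====

-- canonical structural recursion both versions are reduced to
def gSpec : List String → Int → List (Int × List (Int × Int)) → List (Int × List (Int × Int))
  | [], _, d => d
  | c :: rest, i, d =>
    if c == "." then
      gSpec (rest.drop (rest.takeWhile (fun x => x == ".")).length)
        (i + (((rest.takeWhile (fun x => x == ".")).length + 1 : Nat) : Int))
        (dictPush d (((rest.takeWhile (fun x => x == ".")).length + 1 : Nat) : Int)
          (i, i + (((rest.takeWhile (fun x => x == ".")).length + 1 : Nat) : Int)))
    else gSpec rest (i + 1) d
termination_by l => l.length
decreasing_by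
  · simp
  · simp

theorem drop_takeWhile_length {α : Type} (p : α → Bool) (l : List α) :
    l.drop (l.takeWhile p).length = l.dropWhile p := by
  induction l with
  | nil => rfl
  | cons c rest ih => by_cases h : p c <;> simp [h, ih]

-- the inner while loop measures the dot-run starting at r
theorem aInner_eq (fs : List String) (r : Nat) :
    aInner fs r = r + ((fs.drop r).takeWhile (fun x => x == ".")).length := by
  induction r using aInner.induct fs with
  | case1 r h hd ih =>
    rw [aInner, dif_pos h, if_pos hd, ih, List.drop_eq_getElem_cons h]
    simp only [List.takeWhile_cons, hd, if_true, List.length_cons]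
    omega
  | case2 r h hd =>
    rw [aInner, dif_pos h, if_neg hd, List.drop_eq_getElem_cons h]
    simp [hd]
  | case3 r h =>
    rw [aInner, dif_neg h]
    have : fs.length ≤ r := by omega
    simp [List.drop_eq_nil_of_le this]

-- A's outer loop equals the canonical recursion on the remaining suffix (fuel induction)
theorem aOuter_eq_fuel (fs : List String) (n left : Nat) (d : List (Int × List (Int × Int)))
    (hn : fs.length - left ≤ n) :
    aOuter fs left d = gSpec (fs.drop left) (left : Int) d := by
  induction n generalizing left d with
  | zero =>
    have h : ¬ left < fs.length := by omega
    rw [aOuter, dif_neg h]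
    have : fs.length ≤ left := by omega
    simp [List.drop_eq_nil_of_le this, gSpec]
  | succ n ih =>
    by_cases h : left < fs.length
    · rw [aOuter, dif_pos h, List.drop_eq_getElem_cons h, gSpec]
      by_cases hd : fs[left] == "."
      · rw [if_pos hd, if_pos hd]
        have hri : aInner fs (left + 1)
            = left + 1 + ((fs.drop (left + 1)).takeWhile (fun x => x == ".")).length :=
          aInner_eq fs (left + 1)
        have hge : left + 1 ≤ aInner fs (left + 1) := aInner_ge fs (left + 1)
        rw [ih _ _ (by omega)]
        have hdd : (fs.drop (left + 1)).drop
              ((fs.drop (left + 1)).takeWhile (fun x => x == ".")).length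
            = fs.drop (aInner fs (left + 1)) := by rw [hri, List.drop_drop]
        have e1 : (left : Int)
              + ((((fs.drop (left + 1)).takeWhile (fun x => x == ".")).length + 1 : Nat) : Int)
            = ((aInner fs (left + 1) : Nat) : Int) := by rw [hri]; push_cast; ring
        have e2 : ((((fs.drop (left + 1)).takeWhile (fun x => x == ".")).length + 1 : Nat) : Int)
            = ((aInner fs (left + 1) : Nat) : Int) - (left : Int) := by rw [hri]; push_cast; ring
        rw [hdd, e1, e2]
      · rw [if_neg hd, if_neg hd, ih _ _ (by omega)]
        push_cast
        ring_nf
    · rw [aOuter, dif_neg h]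
      have : fs.length ≤ left := by omega
      simp [List.drop_eq_nil_of_le this, gSpec]

-- ---- B side ----

-- proof-side view of the dot-index list with an arbitrary starting position
def dotsFrom : List String → Int → List Int
  | [], _ => []
  | c :: rest, i => if c == "." then i :: dotsFrom rest (i + 1) else dotsFrom rest (i + 1)

theorem bDots_from (fs : List String) (i : Int) :
    (PySem.List.enumerate fs i).filterMap (fun t => if t.2 == "." then some t.1 else none)
      = dotsFrom fs i := by
  induction fs generalizing i with
  | nil => simp [PySem.List.enumerate_nil, dotsFrom]
  | cons c rest ih =>
    rw [PySem.List.enumerate_cons, dotsFrom]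
    by_cases h : c = "." <;> simp [h] <;> simpa using ih (i + 1)

-- the run [i, i+1, …, i+n-1] of consecutive positions
def consecFrom : Int → Nat → List Int
  | _, 0 => []
  | i, n + 1 => i :: consecFrom (i + 1) n

theorem length_consecFrom (i : Int) (n : Nat) : (consecFrom i n).length = n := by
  induction n generalizing i with
  | zero => rfl
  | succ n ih => simp [consecFrom, ih]

-- dots of an all-dot prefix are the consecutive positions
theorem dotsFrom_run (t : List String) (ht : ∀ c ∈ t, (c == ".") = true) (r : List String) (i : Int) :
    dotsFrom (t ++ r) i = consecFrom i t.length ++ dotsFrom r (i + t.length) := by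
  induction t generalizing i with
  | nil => simp [consecFrom]
  | cons c cs ih =>
    have hc := ht c (by simp)
    rw [List.cons_append, dotsFrom, if_pos hc, List.length_cons, consecFrom,
      ih (fun x hx => ht x (by simp [hx]))]
    simp only [List.cons_append, List.cons.injEq, true_and]
    congr 2
    push_cast; ring

-- keys p - j of (j, p) ∈ enumerate (dotsFrom l i) j are bounded below by i - j
theorem dots_key_lb (l : List String) (i j : Int) (t : Int × Int)
    (ht : t ∈ PySem.List.enumerate (dotsFrom l i) j) : i - j ≤ t.2 - t.1 := by
  induction l generalizing i j with
  | nil => simp [dotsFrom, PySem.List.enumerate_nil] at ht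
  | cons c rest ih =>
    rw [dotsFrom] at ht
    by_cases h : c == "."
    · rw [if_pos h, PySem.List.enumerate_cons] at ht
      rcases List.mem_cons.mp ht with he | hm
      · subst he; simp
      · have := ih (i + 1) (j + 1) hm; omega
    · rw [if_neg h] at ht
      have := ih (i + 1) j ht; omega

theorem enum_consec_keys (i j : Int) (n : Nat) (t : Int × Int)
    (ht : t ∈ PySem.List.enumerate (consecFrom i n) j) : t.2 - t.1 = i - j := by
  induction n generalizing i j with
  | zero => simp [consecFrom, PySem.List.enumerate_nil] at ht
  | succ n ih =>
    rw [consecFrom, PySem.List.enumerate_cons] at ht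
    rcases List.mem_cons.mp ht with he | hm
    · subst he; simp
    · have := ih (i + 1) (j + 1) hm; omega

theorem takeWhile_append_all {α : Type} (p : α → Bool) (xs ys : List α)
    (h : ∀ x ∈ xs, p x = true) :
    (xs ++ ys).takeWhile p = xs ++ ys.takeWhile p := by
  induction xs with
  | nil => simp
  | cons a l ih =>
    rw [List.cons_append, List.takeWhile_cons, h a (by simp)]
    simp [ih (fun x hx => h x (by simp [hx]))]

theorem takeWhile_nil_of_all {α : Type} (p : α → Bool) (xs : List α)
    (h : ∀ x ∈ xs, p x = false) : xs.takeWhile p = [] := by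
  cases xs with
  | nil => rfl
  | cons a l => rw [List.takeWhile_cons, h a (by simp)]; rfl

-- in dropWhile's output the leading character is not a dot, so its dot keys are strictly larger
theorem dropWhile_keys_gt (rest : List String) (i j : Int) (t : Int × Int)
    (ht : t ∈ PySem.List.enumerate (dotsFrom (rest.dropWhile (fun x => x == ".")) i) j) :
    i - j < t.2 - t.1 := by
  induction rest with
  | nil => simp [List.dropWhile, dotsFrom, PySem.List.enumerate_nil] at ht
  | cons c cs ih =>
    rw [List.dropWhile_cons] at ht
    by_cases h : c == "."
    · rw [if_pos h] at ht; exact ih ht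
    · rw [if_neg h] at ht
      rw [dotsFrom, if_neg h] at ht
      have := dots_key_lb cs (i + 1) j t ht
      omega

-- B's group loop equals the canonical recursion (fuel induction)
theorem bLoop_eq_fuel (n : Nat) (fs : List String) (hn : fs.length ≤ n) (i j : Int)
    (d : List (Int × List (Int × Int))) :
    bLoop (PySem.List.enumerate (dotsFrom fs i) j) d = gSpec fs i d := by
  induction n generalizing fs i j d with
  | zero =>
    have : fs = [] := by cases fs with | nil => rfl | cons c cs => simp at hn
    subst this
    simp [dotsFrom, PySem.List.enumerate_nil, bLoop, gSpec]
  | succ n ih =>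
    cases fs with
    | nil => simp [dotsFrom, PySem.List.enumerate_nil, bLoop, gSpec]
    | cons c rest =>
      rw [dotsFrom, gSpec]
      by_cases h : c == "."
      · rw [if_pos h, if_pos h, PySem.List.enumerate_cons, bLoop]
        set t := rest.takeWhile (fun x => x == ".") with hT
        set r := rest.drop t.length with hR
        have hrw : r = rest.dropWhile (fun x => x == ".") := by
          rw [hR, drop_takeWhile_length]
        have hsplit : t ++ r = rest := by
          rw [hrw, hT]; exact List.takeWhile_append_dropWhile
        have htall : ∀ x ∈ t, (x == ".") = true := by
          intro x hx; rw [hT] at hx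
          exact List.mem_takeWhile_imp (p := fun y => y == ".") hx
        have hd1 : dotsFrom rest (i + 1)
            = consecFrom (i + 1) t.length ++ dotsFrom r (i + 1 + t.length) := by
          conv_lhs => rw [← hsplit]
          exact dotsFrom_run t htall r (i + 1)
        rw [hd1, PySem.List.enumerate_append]
        -- the takeWhile picks exactly the consecutive prefix
        have hpref : ∀ x ∈ PySem.List.enumerate (consecFrom (i + 1) t.length) (j + 1),
            (fun u : Int × Int => u.2 - u.1 == i - j) x = true := by
          intro x hx
          have := enum_consec_keys (i + 1) (j + 1) t.length x hx
          simp only [beq_iff_eq]; omega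
        have htail : ∀ x ∈ PySem.List.enumerate (dotsFrom r (i + 1 + t.length))
            (j + 1 + (consecFrom (i + 1) t.length).length),
            (fun u : Int × Int => u.2 - u.1 == i - j) x = false := by
          intro x hx
          rw [hrw] at hx
          have := dropWhile_keys_gt rest (i + 1 + t.length)
            (j + 1 + (consecFrom (i + 1) t.length).length) x hx
          rw [length_consecFrom] at this
          simp only [beq_eq_false_iff_ne, ne_eq]
          omega
        rw [takeWhile_append_all _ _ _ hpref, takeWhile_nil_of_all _ _ htail, List.append_nil]
        have hlen : (PySem.List.enumerate (consecFrom (i + 1) t.length) (j + 1)).length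
            = t.length := by rw [PySem.List.length_enumerate, length_consecFrom]
        rw [hlen]
        have hdrop : (PySem.List.enumerate (consecFrom (i + 1) t.length) (j + 1)
              ++ PySem.List.enumerate (dotsFrom r (i + 1 + t.length))
                   (j + 1 + (consecFrom (i + 1) t.length).length)).drop t.length
            = PySem.List.enumerate (dotsFrom r (i + 1 + t.length))
                (j + 1 + (consecFrom (i + 1) t.length).length) := by
          exact List.drop_left' hlen
        rw [hdrop]
        have hfuel : r.length ≤ n := by
          have : r.length ≤ rest.length := by rw [hR]; simp
          simp only [List.length_cons] at hn; omega
        rw [ih r hfuel (i + 1 + t.length) _ _]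
        have hi : i + 1 + (t.length : Int) = i + ((t.length + 1 : Nat) : Int) := by
          push_cast; ring
        rw [hi]
      · rw [if_neg h, if_neg h]
        have hfuel : rest.length ≤ n := by simp only [List.length_cons] at hn; omega
        exact ih rest hfuel (i + 1) j d

-- ===== VERDICT (by name: the statement is the Claim_ definition above) =====
theorem get_heaps_spec : Claim_equal_get_heaps := by
  intro fs _
  unfold Spec_get_heaps get_heaps get_heaps_alt bDots
  rw [aOuter_eq_fuel fs fs.length 0 [] (by omega), bDots_from fs 0,
    bLoop_eq_fuel fs.length fs (by omega) 0 0]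
  simp
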